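-- pv_equiv track=rewrite | github.com/wf9a5m75/leetcode | maximum-xor-for-each-query/solution.py | getMaximumXor_optimized
-- ===== SOURCE A (Python) =====
-- from typing import List
--
-- def getMaximumXor_optimized(nums: List[int], maximumBit: int) -> List[int]:
--     mask = 2**maximumBit - 1
--
--     N = len(nums)
--     ans = [0] * N
--     prefixXOR = 0
--     j = N - 1
--     for num in nums:
--         prefixXOR = prefixXOR ^ num
--         ans[j] = prefixXOR ^ mask
--         j -= 1
--
--     return ans
-- ===== SOURCE B (Python) =====
-- from typing import List
--
-- def getMaximumXor_optimized(nums: List[int], maximumBit: int) -> List[int]: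
--     # Divide and conquer: prefix XORs of L ++ R are the prefix XORs of L
--     # followed by (xor of all of L) ^ each prefix XOR of R; combine halves
--     # recursively, then reverse and apply the mask.
--     mask = (1 << maximumBit) - 1
--
--     def pxors(lo: int, hi: int):
--         # returns (xor of nums[lo:hi], list of prefix XORs of nums[lo:hi])
--         if hi - lo == 0:
--             return 0, []
--         if hi - lo == 1:
--             return nums[lo], [nums[lo]]
--         mid = (lo + hi) // 2
--         tl, pl = pxors(lo, mid)
--         tr, pr = pxors(mid, hi)
--         return tl ^ tr, pl + [tl ^ p for p in pr]
--
--     _, p = pxors(0, len(nums))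
--     return [x ^ mask for x in reversed(p)]
-- ===== Notes on version B (the rewrite author's own statement) =====
-- stated objective: alternative
-- what changed: A is a single left-to-right pass that accumulates a running prefix XOR and writes the answer array back-to-front by index; B is a divide-and-conquer: it recursively computes the prefix-XOR lists of the two halves, merges them (right half shifted by the left half's total XOR), then reverses and applies the mask.
-- outside the precondition, e.g. on getMaximumXor_optimized([], -1): A returns [], B raises ValueError
import Mathlib
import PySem

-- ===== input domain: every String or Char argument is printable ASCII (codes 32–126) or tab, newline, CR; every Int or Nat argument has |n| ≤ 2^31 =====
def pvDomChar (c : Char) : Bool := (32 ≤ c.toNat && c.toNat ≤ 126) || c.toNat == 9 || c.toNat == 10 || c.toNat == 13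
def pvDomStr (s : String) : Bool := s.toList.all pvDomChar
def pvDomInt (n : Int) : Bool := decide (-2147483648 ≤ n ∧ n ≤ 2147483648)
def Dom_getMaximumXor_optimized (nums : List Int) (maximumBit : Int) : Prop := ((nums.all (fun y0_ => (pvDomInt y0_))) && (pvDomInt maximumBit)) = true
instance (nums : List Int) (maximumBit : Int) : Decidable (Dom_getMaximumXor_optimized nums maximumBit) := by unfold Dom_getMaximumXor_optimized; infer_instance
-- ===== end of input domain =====

-- B replaces A's single accumulating pass (which fills the answer array back-to-front
-- by index) with a divide-and-conquer computation of the prefix-XOR list (merge the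
-- halves, shifting the right half by the left half's total XOR), then reverses and
-- applies the mask; same result, alternative algorithm.

-- ===== PORT A =====
def getMaximumXor_optimized (nums : List Int) (maximumBit : Int) : List Int :=
  let mask : Int := 2 ^ maximumBit.toNat - 1   -- 2**maximumBit - 1 (Pre_ requires 0 ≤ maximumBit)
  let N := nums.length
  -- for num in nums: prefixXOR ^= num; ans[j] = prefixXOR ^ mask; j -= 1
  -- (j is nonnegative whenever the assignment runs, so ans[j] is .set at j.toNat)
  (nums.foldl
    (fun (st : List Int × Int × Int) num =>
      let prefixXOR := PySem.Int.bxor st.2.1 num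
      (st.1.set st.2.2.toNat (PySem.Int.bxor prefixXOR mask), prefixXOR, st.2.2 - 1))
    (List.replicate N 0, 0, (N : Int) - 1)).1

-- ===== PORT B =====
-- pxors(lo, hi): (xor of nums[lo:hi], prefix XORs of nums[lo:hi]); all calls have
-- 0 ≤ lo ≤ hi ≤ len(nums), so nums[lo] is in range and '(lo+hi)//2' is Nat division.
-- fuel (≥ hi - lo at every call, so never exhausted) only makes the recursion structural.
def pvPxorsGo (nums : List Int) (fuel lo hi : Nat) : Int × List Int :=
  if hi - lo = 0 then (0, [])
  else if hi - lo = 1 then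
    let x := (PySem.List.pyGet? nums (lo : Int)).getD 0
    (x, [x])
  else
    match fuel with
    | 0 => (0, [])
    | fuel' + 1 =>
      let mid := (lo + hi) / 2
      let l := pvPxorsGo nums fuel' lo mid
      let r := pvPxorsGo nums fuel' mid hi
      (PySem.Int.bxor l.1 r.1, l.2 ++ r.2.map (fun p => PySem.Int.bxor l.1 p))

def getMaximumXor_optimized_alt (nums : List Int) (maximumBit : Int) : List Int :=
  let mask : Int := 2 ^ maximumBit.toNat - 1   -- (1 << maximumBit) - 1 (Pre_ requires 0 ≤ maximumBit)
  let p := (pvPxorsGo nums nums.length 0 nums.length).2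
  p.reverse.map (fun x => PySem.Int.bxor x mask)

-- ===== PRECONDITION & SPEC =====
-- Pre_ excludes negative maximumBit: Python A raises a TypeError on any nonempty nums
-- (2**maximumBit is a float there), and B raises ValueError on (1 << maximumBit) even
-- for empty nums (where A still returns []).
def Pre_getMaximumXor_optimized (nums : List Int) (maximumBit : Int) : Prop := 0 ≤ maximumBit
instance (nums : List Int) (maximumBit : Int) : Decidable (Pre_getMaximumXor_optimized nums maximumBit) := by unfold Pre_getMaximumXor_optimized; infer_instance
def pvWitness_getMaximumXor_optimized : List Int × Int := ([0, 1, 1, 3], 2)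

def Spec_getMaximumXor_optimized (nums : List Int) (maximumBit : Int) (out : List Int) : Prop := out = getMaximumXor_optimized_alt nums maximumBit
instance (nums : List Int) (maximumBit : Int) (out : List Int) : Decidable (Spec_getMaximumXor_optimized nums maximumBit out) := by unfold Spec_getMaximumXor_optimized; infer_instance

-- ===== CLAIM (what is proved, stated in full; the proofs are below) =====
def Claim_equal_getMaximumXor_optimized : Prop := ∀ (nums : List Int) (maximumBit : Int), Dom_getMaximumXor_optimized nums maximumBit → Pre_getMaximumXor_optimized nums maximumBit → Spec_getMaximumXor_optimized nums maximumBit (getMaximumXor_optimized nums maximumBit)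

-- ===== LEMMAS AND PROOFS =====

-- bxor is core Int.xor
theorem pv_bxor_eq_xor (a b : Int) : PySem.Int.bxor a b = Int.xor a b := by
  unfold PySem.Int.bxor
  cases a with
  | ofNat m => cases b with
    | ofNat n => simp [Int.xor]
    | negSucc n => simp [Int.xor, Int.negSucc_eq]; omega
  | negSucc m => cases b with
    | ofNat n => simp [Int.xor, Int.negSucc_eq]; omega
    | negSucc n => simp [Int.xor, Int.negSucc_eq]; omega

theorem pv_bxor_zero (a : Int) : PySem.Int.bxor a 0 = a := by
  rw [pv_bxor_eq_xor]; cases a <;> simp [Int.xor]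

theorem pv_zero_bxor (a : Int) : PySem.Int.bxor 0 a = a := by
  rw [pv_bxor_eq_xor]; cases a <;> simp [Int.xor]

theorem pv_bxor_assoc (a b c : Int) :
    PySem.Int.bxor (PySem.Int.bxor a b) c = PySem.Int.bxor a (PySem.Int.bxor b c) := by
  simp only [pv_bxor_eq_xor]
  cases a <;> cases b <;> cases c <;> simp [Int.xor, Nat.xor_assoc]

-- the list of prefix XORs [p1, ..., pN] starting from accumulator a
def pvPfx : List Int → Int → List Int
  | [], _ => []
  | x :: xs, a => PySem.Int.bxor a x :: pvPfx xs (PySem.Int.bxor a x)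

-- the common value of both programs: the reversed prefix-XOR list, each entry ^ mask
def pvT (nums : List Int) (mask : Int) : List Int :=
  (pvPfx nums 0).reverse.map (fun p => PySem.Int.bxor p mask)

theorem pv_set_replicate (v : Int) : ∀ (k : Nat) (done : List Int),
    (List.replicate (k + 1) (0 : Int) ++ done).set k v = List.replicate k 0 ++ v :: done := by
  intro k
  induction k with
  | zero => intro done; simp
  | succ m ih =>
    intro done
    rw [List.replicate_succ, List.cons_append, List.set_cons_succ, ih,
      List.replicate_succ, List.cons_append]

-- A's loop: filling back-to-front produces the reversed mapped prefix list
theorem pv_foldA (mask : Int) : ∀ (rest : List Int) (pre : Int) (done : List Int),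
    (rest.foldl
      (fun (st : List Int × Int × Int) num =>
        let prefixXOR := PySem.Int.bxor st.2.1 num
        (st.1.set st.2.2.toNat (PySem.Int.bxor prefixXOR mask), prefixXOR, st.2.2 - 1))
      (List.replicate rest.length 0 ++ done, pre, (rest.length : Int) - 1)).1
    = ((pvPfx rest pre).map (fun p => PySem.Int.bxor p mask)).reverse ++ done := by
  intro rest
  induction rest with
  | nil => intro pre done; simp [pvPfx]
  | cons x xs ih =>
    intro pre done
    simp only [List.foldl_cons, List.length_cons]
    have h1 : (((xs.length + 1 : Nat) : Int) - 1).toNat = xs.length := by omega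
    have h2 : ((xs.length + 1 : Nat) : Int) - 1 - 1 = (xs.length : Int) - 1 := by push_cast; ring
    rw [h1, h2, pv_set_replicate, ih (PySem.Int.bxor pre x) (PySem.Int.bxor (PySem.Int.bxor pre x) mask :: done)]
    simp [pvPfx]

-- A = pvT
theorem pv_A_eq (nums : List Int) (maximumBit : Int) :
    getMaximumXor_optimized nums maximumBit = pvT nums (2 ^ maximumBit.toNat - 1) := by
  unfold getMaximumXor_optimized pvT
  have := pv_foldA (2 ^ maximumBit.toNat - 1) nums 0 []
  simp only [List.append_nil] at this
  rw [this, List.map_reverse]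

-- shifting the accumulator of pvPfx maps bxor over the list
theorem pvPfx_shift : ∀ (xs : List Int) (a b : Int),
    pvPfx xs (PySem.Int.bxor a b) = (pvPfx xs b).map (fun p => PySem.Int.bxor a p) := by
  intro xs
  induction xs with
  | nil => intro a b; rfl
  | cons x xs ih =>
    intro a b
    simp only [pvPfx, List.map_cons, pv_bxor_assoc, ih a (PySem.Int.bxor b x)]

theorem pvPfx_zero_shift (xs : List Int) (a : Int) :
    pvPfx xs a = (pvPfx xs 0).map (fun p => PySem.Int.bxor a p) := by
  rw [← pvPfx_shift, pv_bxor_zero]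

theorem pvPfx_append : ∀ (l1 l2 : List Int) (a : Int),
    pvPfx (l1 ++ l2) a
      = pvPfx l1 a ++ pvPfx l2 (l1.foldl (fun t v => PySem.Int.bxor t v) a) := by
  intro l1
  induction l1 with
  | nil => intro l2 a; rfl
  | cons x xs ih => intro l2 a; simp [pvPfx, ih]

theorem pv_foldl_shift : ∀ (xs : List Int) (a : Int),
    xs.foldl (fun t v => PySem.Int.bxor t v) a
      = PySem.Int.bxor a (xs.foldl (fun t v => PySem.Int.bxor t v) 0) := by
  intro xs
  induction xs with
  | nil => intro a; rw [List.foldl_nil, List.foldl_nil, pv_bxor_zero]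
  | cons x xs ih =>
    intro a
    rw [List.foldl_cons, List.foldl_cons, ih (PySem.Int.bxor a x),
      ih (PySem.Int.bxor 0 x), pv_zero_bxor, pv_bxor_assoc]

-- characterisation of B's recursion: it computes the fold and the prefix list of the slice
theorem pvPxorsGo_spec (nums : List Int) : ∀ (fuel lo hi : Nat), hi - lo ≤ fuel → hi ≤ nums.length →
    pvPxorsGo nums fuel lo hi =
      (((nums.drop lo).take (hi - lo)).foldl (fun t v => PySem.Int.bxor t v) 0,
       pvPfx ((nums.drop lo).take (hi - lo)) 0) := by
  intro fuel
  induction fuel with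
  | zero =>
    intro lo hi hf hhi
    rw [pvPxorsGo, if_pos (by omega : hi - lo = 0), (by omega : hi - lo = 0)]
    simp [pvPfx]
  | succ fuel ih =>
    intro lo hi hf hhi
    rw [pvPxorsGo]
    by_cases h0 : hi - lo = 0
    · rw [if_pos h0, h0]
      simp [pvPfx]
    rw [if_neg h0]
    by_cases h1 : hi - lo = 1
    · rw [if_pos h1, h1]
      have hlo : lo < nums.length := by omega
      have htake : (nums.drop lo).take 1 = [nums[lo]] := by
        rw [List.drop_eq_getElem_cons hlo, List.take_succ_cons, List.take_zero]
      rw [htake]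
      simp [pvPfx, pv_zero_bxor, PySem.List.pyGet?_natCast, List.getElem?_eq_getElem hlo]
    rw [if_neg h1]
    dsimp only
    have hm1 : lo < (lo + hi) / 2 := by omega
    have hm2 : (lo + hi) / 2 < hi := by omega
    rw [ih lo ((lo + hi) / 2) (by omega) (by omega),
        ih ((lo + hi) / 2) hi (by omega) hhi]
    have hdd : (nums.drop lo).drop ((lo + hi) / 2 - lo) = nums.drop ((lo + hi) / 2) := by
      rw [List.drop_drop]; congr 1; omega
    have hsplit : (nums.drop lo).take (hi - lo)
        = (nums.drop lo).take ((lo + hi) / 2 - lo)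
          ++ (nums.drop ((lo + hi) / 2)).take (hi - (lo + hi) / 2) := by
      rw [show hi - lo = ((lo + hi) / 2 - lo) + (hi - (lo + hi) / 2) from by omega,
        List.take_add, hdd]
    rw [hsplit, pvPfx_append, List.foldl_append]
    dsimp only
    rw [pv_foldl_shift ((nums.drop ((lo + hi) / 2)).take (hi - (lo + hi) / 2))
        (((nums.drop lo).take ((lo + hi) / 2 - lo)).foldl (fun t v => PySem.Int.bxor t v) 0),
      pvPfx_zero_shift ((nums.drop ((lo + hi) / 2)).take (hi - (lo + hi) / 2))
        (((nums.drop lo).take ((lo + hi) / 2 - lo)).foldl (fun t v => PySem.Int.bxor t v) 0)]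

-- B = pvT
theorem pv_B_eq (nums : List Int) (maximumBit : Int) :
    getMaximumXor_optimized_alt nums maximumBit = pvT nums (2 ^ maximumBit.toNat - 1) := by
  unfold getMaximumXor_optimized_alt pvT
  rw [pvPxorsGo_spec nums nums.length 0 nums.length (by omega) le_rfl]
  simp

-- ===== VERDICT (by name: the statement is the Claim_ definition above) =====
theorem getMaximumXor_optimized_spec : Claim_equal_getMaximumXor_optimized := by
  intro nums maximumBit _ _
  unfold Spec_getMaximumXor_optimized
  rw [pv_A_eq, pv_B_eq]
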